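-- pv_equiv track=rewrite | github.com/Lenchik16/Educational-project | add_program_to_graduate.py | process_contacts
-- ===== SOURCE A (Python) =====
-- def process_contacts(lines):
--     contacts = []
--     current_name = None
--
--     for line in lines:
--         line = line.strip()
--         if not line:
--             continue
--         if line.startswith("e-mail:"):
--             if current_name:
--                 email = line.split(":", 1)[1].strip()
--                 contacts.append({"name": current_name, "email": email})
--                 current_name = None
--         else:
--             if current_name:
--                 contacts.append({"name": current_name, "email": "Нет информации"})
--             current_name = line
--
--     if current_name:
--         contacts.append({"name": current_name, "email": "Нет информации"})
--
--     return contacts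
-- ===== SOURCE B (Python) =====
-- def process_contacts(lines):
--     cleaned = [s for s in (l.strip() for l in lines) if s]
--     contacts = []
--     i = 0
--     n = len(cleaned)
--     while i < n:
--         cur = cleaned[i]
--         if cur.startswith("e-mail:"):
--             i += 1  # standalone e-mail line with no preceding name: dropped
--             continue
--         if i + 1 < n and cleaned[i + 1].startswith("e-mail:"):
--             contacts.append({"name": cur, "email": cleaned[i + 1].split(":", 1)[1].strip()})
--             i += 2
--         else:
--             contacts.append({"name": cur, "email": "Нет информации"})
--             i += 1
--     return contacts
-- ===== Notes on version B (the rewrite author's own statement) =====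
-- stated objective: alternative
-- what changed: Replaces A's single stateful pass carrying current_name (with a trailing flush) by a two-phase decomposition: first strip lines and drop blanks, then an index-based walk with lookahead that pairs each name with the next line if it is an e-mail line.
import Mathlib
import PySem

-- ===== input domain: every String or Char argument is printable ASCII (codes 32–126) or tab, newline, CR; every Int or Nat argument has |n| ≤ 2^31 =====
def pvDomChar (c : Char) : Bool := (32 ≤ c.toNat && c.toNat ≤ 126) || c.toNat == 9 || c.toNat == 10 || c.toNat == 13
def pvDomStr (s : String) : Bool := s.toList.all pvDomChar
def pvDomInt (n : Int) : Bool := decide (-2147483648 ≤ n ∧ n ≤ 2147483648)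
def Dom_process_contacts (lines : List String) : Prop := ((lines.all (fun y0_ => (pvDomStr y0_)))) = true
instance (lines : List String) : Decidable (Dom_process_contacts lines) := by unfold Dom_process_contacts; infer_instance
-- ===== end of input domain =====

-- B replaces A's carried current_name state by a strip-and-filter pass followed by an
-- index/lookahead walk over the cleaned lines (objective: alternative decomposition).

-- ===== PORT A =====
-- line.split(":", 1)[1].strip(); the [1] (Python would raise if ":" were absent) is only
-- reached under startswith "e-mail:", which guarantees a ":", so getD is exact there.
def pvEmailAfter (line : String) : String :=
  PySem.Str.strip (((PySem.Str.splitMax? line ":" 1).getD []).getD 1 "")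

-- loop body of A: state = (contacts so far, current_name : Option String)
def pvStepA (st : List (List (String × String)) × Option String) (line0 : String) :
    List (List (String × String)) × Option String :=
  let line := PySem.Str.strip line0
  if line = "" then st
  else if PySem.Str.startswith line "e-mail:" then
    match st.2 with
    | some n => (st.1 ++ [[("name", n), ("email", pvEmailAfter line)]], none)
    | none => st
  else
    match st.2 with
    | some n => (st.1 ++ [[("name", n), ("email", "Нет информации")]], some line)
    | none => (st.1, some line)

-- the trailing 'if current_name:' flush
def pvFinish (st : List (List (String × String)) × Option String) :
    List (List (String × String)) :=
  st.1 ++ (match st.2 with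
           | some n => [[("name", n), ("email", "Нет информации")]]
           | none => [])

def process_contacts (lines : List String) : List (List (String × String)) :=
  pvFinish (lines.foldl pvStepA ([], none))

-- ===== PORT B =====
-- index walk with lookahead over the cleaned list (Source B's while-loop; advancing the
-- index by 1 or 2 becomes recursion on the corresponding tail)
def pvWalk : List String → List (List (String × String))
  | [] => []
  | x :: rest =>
    if PySem.Str.startswith x "e-mail:" then pvWalk rest
    else
      match rest with
      | y :: rest2 =>
        if PySem.Str.startswith y "e-mail:" then
          [("name", x), ("email", pvEmailAfter y)] :: pvWalk rest2
        else
          [("name", x), ("email", "Нет информации")] :: pvWalk (y :: rest2)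
      | [] => [[("name", x), ("email", "Нет информации")]]

def process_contacts_alt (lines : List String) : List (List (String × String)) :=
  pvWalk (((lines.map PySem.Str.strip)).filter (· ≠ ""))

-- ===== PRECONDITION & SPEC =====
def Spec_process_contacts (lines : List String) (out : List (List (String × String))) : Prop := out = process_contacts_alt lines
instance (lines : List String) (out : List (List (String × String))) : Decidable (Spec_process_contacts lines out) := by unfold Spec_process_contacts; infer_instance

-- ===== CLAIM (what is proved, stated in full; the proofs are below) =====
def Claim_equal_process_contacts : Prop := ∀ (lines : List String), Dom_process_contacts lines → Spec_process_contacts lines (process_contacts lines)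

-- ===== LEMMAS AND PROOFS =====

-- A's loop body on an already-stripped, non-blank line
def pvStepC (st : List (List (String × String)) × Option String) (line : String) :
    List (List (String × String)) × Option String :=
  if PySem.Str.startswith line "e-mail:" then
    match st.2 with
    | some n => (st.1 ++ [[("name", n), ("email", pvEmailAfter line)]], none)
    | none => st
  else
    match st.2 with
    | some n => (st.1 ++ [[("name", n), ("email", "Нет информации")]], some line)
    | none => (st.1, some line)

theorem pvStepA_eq (st : List (List (String × String)) × Option String) (line : String) :
    pvStepA st line =
      if PySem.Str.strip line = "" then st else pvStepC st (PySem.Str.strip line) := by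
  simp only [pvStepA, pvStepC]

theorem pvFoldA_clean (lines : List String)
    (st : List (List (String × String)) × Option String) :
    lines.foldl pvStepA st =
      ((lines.map PySem.Str.strip).filter (· ≠ "")).foldl pvStepC st := by
  induction lines generalizing st with
  | nil => rfl
  | cons l ls ih =>
    simp only [List.foldl_cons, List.map_cons, List.filter_cons, pvStepA_eq]
    by_cases h : PySem.Str.strip l = "" <;> simp [h, ih]

-- what A's state fold still produces from state (acc, cur) on the remaining clean lines
def pvPair : Option String → List String → List (List (String × String))
  | none, [] => []
  | some n, [] => [[("name", n), ("email", "Нет информации")]]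
  | cur, x :: rest =>
    if PySem.Str.startswith x "e-mail:" then
      match cur with
      | some n => [("name", n), ("email", pvEmailAfter x)] :: pvPair none rest
      | none => pvPair none rest
    else
      match cur with
      | some n => [("name", n), ("email", "Нет информации")] :: pvPair (some x) rest
      | none => pvPair (some x) rest

theorem pvFold_pair (cs : List String) (acc : List (List (String × String)))
    (cur : Option String) :
    pvFinish (cs.foldl pvStepC (acc, cur)) = acc ++ pvPair cur cs := by
  induction cs generalizing acc cur with
  | nil => cases cur <;> simp [pvFinish, pvPair]
  | cons x rest ih =>
    by_cases hx : PySem.Str.startswith x "e-mail:" = true <;>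
      simp at hx <;>
        cases cur <;>
          simp [pvStepC, pvPair, hx, ih]

theorem pvPair_walk (cs : List String) : pvPair none cs = pvWalk cs := by
  induction cs using pvWalk.induct with
  | case1 => rfl
  | case2 x rest hx ih =>
    simp at hx
    simp only [pvPair, ih]
    conv_rhs => rw [pvWalk.eq_def]
    simp [hx]
  | case3 x hx y rest2 hy ih =>
    simp at hx hy
    simp [pvPair, pvWalk, hx, hy, ih]
  | case4 x hx y rest2 hy ih =>
    simp at hx hy
    have h' : pvPair (some y) rest2 = pvWalk (y :: rest2) := by
      simpa [pvPair, pvWalk, hy] using ih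
    simp [pvPair, pvWalk, hx, hy, h']
  | case5 x hx =>
    simp at hx
    simp [pvPair, pvWalk, hx]

-- ===== VERDICT (by name: the statement is the Claim_ definition above) =====
theorem process_contacts_spec : Claim_equal_process_contacts := by
  intro lines _
  show process_contacts lines = process_contacts_alt lines
  rw [process_contacts, pvFoldA_clean, pvFold_pair, pvPair_walk]
  rfl
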